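-- pv_equiv track=rewrite | github.com/DonkRonk17/DRLS | ai/advanced_theme_generator.py | _analyze_color_preference
-- ===== SOURCE A (Python) =====
-- from typing import Dict, List
--
-- def _analyze_color_preference(user_data: Dict) -> str:
--     """Determine user's color preferences based on their choices"""
--     # Simulate AI analysis of user's previous theme choices
--     color_choices = user_data.get('previous_colors', [])
--
--     if any('dark' in choice for choice in color_choices):
--         return "dark_themes"
--     elif any('bright' in choice for choice in color_choices):
--         return "vibrant_themes"
--     elif any('blue' in choice for choice in color_choices):
--         return "cool_themes"
--     else:
--         return "balanced_themes"
-- ===== SOURCE B (Python) =====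
-- def _analyze_color_preference(user_data):
--     """Map each choice to a numeric priority rank and take the minimum rank."""
--     names = ("dark_themes", "vibrant_themes", "cool_themes", "balanced_themes")
--
--     def rank(choice):
--         if 'dark' in choice:
--             return 0
--         if 'bright' in choice:
--             return 1
--         if 'blue' in choice:
--             return 2
--         return 3
--
--     return names[min(map(rank, user_data.get('previous_colors', [])), default=3)]
-- ===== Notes on version B (the rewrite author's own statement) =====
-- stated objective: alternative
-- what changed: Three priority-ordered short-circuiting any() scans are replaced by mapping each choice to a numeric priority rank (0=dark,1=bright,2=blue,3=none), taking the minimum rank over the list in one pass, and indexing a name table with it.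
import Mathlib
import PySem

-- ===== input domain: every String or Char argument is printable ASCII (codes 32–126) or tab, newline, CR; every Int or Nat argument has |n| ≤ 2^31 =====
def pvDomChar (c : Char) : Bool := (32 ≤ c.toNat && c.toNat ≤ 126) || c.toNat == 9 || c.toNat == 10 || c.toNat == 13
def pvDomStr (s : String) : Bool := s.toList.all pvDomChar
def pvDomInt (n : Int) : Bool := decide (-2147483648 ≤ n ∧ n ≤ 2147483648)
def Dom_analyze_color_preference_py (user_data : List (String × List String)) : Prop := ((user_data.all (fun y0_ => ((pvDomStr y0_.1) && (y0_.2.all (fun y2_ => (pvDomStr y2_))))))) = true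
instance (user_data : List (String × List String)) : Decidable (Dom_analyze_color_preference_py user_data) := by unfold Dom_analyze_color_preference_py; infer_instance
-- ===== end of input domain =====

-- B replaces the three priority-ordered any() scans by a per-choice numeric rank,
-- minimized in one pass and used to index a name table (objective: alternative).

-- ===== PORT A =====
def analyze_color_preference_py (user_data : List (String × List String)) : String :=
  let color_choices := ((PySem.Dict.mk user_data).getD "previous_colors" [])
  if color_choices.any (fun choice => PySem.Str.isIn "dark" choice) then "dark_themes"
  else if color_choices.any (fun choice => PySem.Str.isIn "bright" choice) then "vibrant_themes"
  else if color_choices.any (fun choice => PySem.Str.isIn "blue" choice) then "cool_themes"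
  else "balanced_themes"

-- ===== PORT B =====
-- per-choice priority rank: 0 = dark, 1 = bright, 2 = blue, 3 = none
def pvRank (choice : String) : Nat :=
  if PySem.Str.isIn "dark" choice then 0
  else if PySem.Str.isIn "bright" choice then 1
  else if PySem.Str.isIn "blue" choice then 2
  else 3

-- min(map(rank, choices), default=3) ported as a fold of Nat.min with initial 3
def analyze_color_preference_py_alt (user_data : List (String × List String)) : String :=
  let best := (((PySem.Dict.mk user_data).getD "previous_colors" [])).foldl
      (fun b choice => min b (pvRank choice)) 3
  match best with
  | 0 => "dark_themes"
  | 1 => "vibrant_themes"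
  | 2 => "cool_themes"
  | _ => "balanced_themes"

-- ===== PRECONDITION & SPEC =====
def Spec_analyze_color_preference_py (user_data : List (String × List String)) (out : String) : Prop := out = analyze_color_preference_py_alt user_data
instance (user_data : List (String × List String)) (out : String) : Decidable (Spec_analyze_color_preference_py user_data out) := by unfold Spec_analyze_color_preference_py; infer_instance

-- ===== CLAIM =====
def Claim_equal_analyze_color_preference_py : Prop := ∀ (user_data : List (String × List String)), Dom_analyze_color_preference_py user_data → Spec_analyze_color_preference_py user_data (analyze_color_preference_py user_data)

-- ===== LEMMAS AND PROOFS =====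

-- the value of A's if-chain, as a number
def pvChainVal (cs : List String) : Nat :=
  if cs.any (fun c => PySem.Str.isIn "dark" c) then 0
  else if cs.any (fun c => PySem.Str.isIn "bright" c) then 1
  else if cs.any (fun c => PySem.Str.isIn "blue" c) then 2
  else 3

lemma pvChainVal_le (cs : List String) : pvChainVal cs ≤ 3 := by
  unfold pvChainVal; split_ifs <;> omega

lemma pvBoolChain (dc bc lc d b l : Bool) :
    (if (dc || d) then 0 else if (bc || b) then 1 else if (lc || l) then 2 else 3)
      = min (if dc then 0 else if bc then 1 else if lc then 2 else 3)
            (if d then 0 else if b then 1 else if l then 2 else (3 : Nat)) := by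
  revert dc bc lc d b l; decide

lemma pvChainVal_cons (c : String) (cs : List String) :
    pvChainVal (c :: cs) = min (pvRank c) (pvChainVal cs) := by
  unfold pvChainVal pvRank
  simp only [List.any_cons]
  exact pvBoolChain _ _ _ _ _ _

lemma pvFold_eq_chain (cs : List String) (b : Nat) (hb : b ≤ 3) :
    cs.foldl (fun b choice => min b (pvRank choice)) b = min b (pvChainVal cs) := by
  induction cs generalizing b with
  | nil => unfold pvChainVal; simp; omega
  | cons c cs ih =>
    rw [List.foldl_cons, ih (min b (pvRank c)) (by omega), pvChainVal_cons, Nat.min_assoc]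

-- ===== VERDICT =====
theorem analyze_color_preference_py_spec : Claim_equal_analyze_color_preference_py := by
  intro ud _
  unfold Spec_analyze_color_preference_py analyze_color_preference_py analyze_color_preference_py_alt
  rw [pvFold_eq_chain _ 3 (le_refl 3)]
  have h := pvChainVal_le ((PySem.Dict.mk ud).getD "previous_colors" [])
  rw [Nat.min_eq_right h]
  unfold pvChainVal
  split_ifs <;> simp only [*] <;> rfl
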